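-- pv_equiv track=rewrite | github.com/HarivonyEllias/IA_S-P_S6 | predict_language_server.py | redundancy
-- ===== SOURCE A (Python) =====
-- def redundancy(language):
--     redundancy_count = 0
--     for word in language:
--         for other_word in language:
--             if word != other_word and (word.startswith(other_word) or word.endswith(other_word)):
--                 redundancy_count += 1
--                 break
--     return redundancy_count
-- ===== SOURCE B (Python) =====
-- def redundancy(language):
--     words = set(language)
--     count = 0
--     for w in language:
--         n = len(w)
--         if any(w[:k] in words or w[n - k:] in words for k in range(n)):
--             count += 1
--     return count
-- ===== Notes on version B (the rewrite author's own statement) =====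
-- stated objective: faster
-- what changed: Replaces the quadratic scan over all pairs of words by a hash set of the words probed with each word's proper prefixes and suffixes, so the inner loop over the list disappears.
import Mathlib
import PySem

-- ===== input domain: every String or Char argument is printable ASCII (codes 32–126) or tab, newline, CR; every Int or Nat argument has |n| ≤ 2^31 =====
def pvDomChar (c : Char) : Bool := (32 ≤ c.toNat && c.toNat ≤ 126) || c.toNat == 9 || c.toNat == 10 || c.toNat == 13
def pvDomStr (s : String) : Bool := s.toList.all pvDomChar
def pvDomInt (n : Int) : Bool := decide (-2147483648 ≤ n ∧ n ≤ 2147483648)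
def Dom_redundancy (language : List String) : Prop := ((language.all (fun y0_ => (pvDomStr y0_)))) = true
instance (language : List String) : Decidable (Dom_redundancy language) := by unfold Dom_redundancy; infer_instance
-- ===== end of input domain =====

-- B replaces A's quadratic scan over all pairs of words by a set of the words
-- probed with each word's proper prefixes and suffixes (faster in a timing run).


-- ===== PORT A =====
def redundancy (language : List String) : Int :=
  language.foldl (fun redundancy_count word =>
    if language.any (fun other_word =>
        (word != other_word) &&
        (PySem.Str.startswith word other_word || PySem.Str.endswith word other_word))
    then redundancy_count + 1 else redundancy_count) 0

-- ===== PORT B =====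
def redundancy_alt (language : List String) : Int :=
  let words : PySem.Set String := PySem.Set.ofList language
  language.foldl (fun count w =>
    let n := PySem.Str.len w
    if (PySem.List.pyRange 0 n).any (fun k =>
        PySem.Set.contains words (PySem.Str.slice w none (some k)) ||
        PySem.Set.contains words (PySem.Str.slice w (some (n - k)) none))
    then count + 1 else count) 0

-- ===== PRECONDITION & SPEC =====
def Spec_redundancy (language : List String) (out : Int) : Prop := out = redundancy_alt language
instance (language : List String) (out : Int) : Decidable (Spec_redundancy language out) := by unfold Spec_redundancy; infer_instance

-- ===== CLAIM (what is proved, stated in full; the proofs are below) =====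
def Claim_equal_redundancy : Prop := ∀ (language : List String), Dom_redundancy language → Spec_redundancy language (redundancy language)

-- ===== LEMMAS AND PROOFS =====

-- A's inner scan and B's prefix/suffix probing test the same condition on each word.
theorem redundancy_cond_eq (L : List String) (w : String) :
    (L.any (fun o =>
        (w != o) && (PySem.Str.startswith w o || PySem.Str.endswith w o)))
    = ((PySem.List.pyRange 0 (PySem.Str.len w)).any (fun k =>
        PySem.Set.contains (PySem.Set.ofList L) (PySem.Str.slice w none (some k)) ||
        PySem.Set.contains (PySem.Set.ofList L) (PySem.Str.slice w (some (PySem.Str.len w - k)) none))) := by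
  rw [Bool.eq_iff_iff]
  simp only [List.any_eq_true, Bool.and_eq_true, Bool.or_eq_true, bne_iff_ne,
    PySem.Str.startswith_eq, PySem.Str.endswith_eq, PySem.Chars.startswith_iff,
    PySem.Chars.endswith_iff, PySem.Set.contains, List.contains_iff_mem,
    PySem.Set.mem_ofList, PySem.List.mem_pyRange_one, PySem.Str.len_eq]
  constructor
  · rintro ⟨o, ho, hne, hps⟩
    have hlen : o.toList.length < w.toList.length := by
      rcases hps with h | h
      · rcases Nat.lt_or_ge o.toList.length w.toList.length with hlt | hge
        · exact hlt
        · exact absurd (String.toList_inj.mp (h.eq_of_length (le_antisymm h.length_le hge)))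
            (fun e => hne e.symm)
      · rcases Nat.lt_or_ge o.toList.length w.toList.length with hlt | hge
        · exact hlt
        · exact absurd (String.toList_inj.mp (h.eq_of_length (le_antisymm h.length_le hge)))
            (fun e => hne e.symm)
    refine ⟨(o.toList.length : Int), ⟨by positivity, by exact_mod_cast hlen⟩, ?_⟩
    rcases hps with h | h
    · left
      have : PySem.Str.slice w none (some (o.toList.length : Int)) = o := by
        apply String.toList_inj.mp
        simp [PySem.Str.slice, PySem.Chars.slice, PySem.List.slice_to_natCast]
        exact (List.prefix_iff_eq_take.mp h).symm
      rwa [this]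
    · right
      have hcast : ((w.toList.length : Int) - (o.toList.length : Int))
          = ((w.toList.length - o.toList.length : Nat) : Int) := by
        omega
      have : PySem.Str.slice w (some ((w.toList.length : Int) - (o.toList.length : Int))) none = o := by
        apply String.toList_inj.mp
        rw [hcast]
        simp [PySem.Str.slice, PySem.Chars.slice, PySem.List.slice_from_natCast]
        exact (List.suffix_iff_eq_drop.mp h).symm
      rwa [this]
  · rintro ⟨k, ⟨hk0, hkn⟩, h⟩
    obtain ⟨m, rfl⟩ : ∃ m : Nat, k = (m : Int) := ⟨k.toNat, (Int.toNat_of_nonneg hk0).symm⟩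
    have hm : m < w.toList.length := by exact_mod_cast hkn
    rcases h with h | h
    · refine ⟨_, h, ?_, Or.inl ?_⟩
      · intro he
        have h1 : (PySem.Str.slice w none (some (m : Int))).toList = w.toList := by rw [← he]
        simp only [PySem.Str.slice, PySem.Chars.slice, String.toList_ofList,
          PySem.List.slice_to_natCast] at h1
        have h2 := congrArg List.length h1
        rw [List.length_take] at h2
        omega
      · simp [PySem.Str.slice, PySem.Chars.slice, PySem.List.slice_to_natCast]
        exact List.take_prefix _ _
    · refine ⟨_, h, ?_, Or.inr ?_⟩
      · intro he
        have hcast : ((w.toList.length : Int) - (m : Int))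
            = ((w.toList.length - m : Nat) : Int) := by omega
        have h1 : (PySem.Str.slice w (some ((w.toList.length : Int) - (m : Int))) none).toList
            = w.toList := by rw [← he]
        rw [hcast] at h1
        simp only [PySem.Str.slice, PySem.Chars.slice, String.toList_ofList,
          PySem.List.slice_from_natCast] at h1
        have h2 := congrArg List.length h1
        rw [List.length_drop] at h2
        omega
      · have hcast : ((w.toList.length : Int) - (m : Int))
            = ((w.toList.length - m : Nat) : Int) := by omega
        rw [hcast]
        simp [PySem.Str.slice, PySem.Chars.slice, PySem.List.slice_from_natCast]
        exact List.drop_suffix _ _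

-- ===== VERDICT (by name: the statement is the Claim_ definition above) =====
theorem redundancy_spec : Claim_equal_redundancy := by
  intro language _
  unfold Spec_redundancy redundancy redundancy_alt
  exact congrArg (fun f => List.foldl f (0 : Int) language)
    (funext fun acc => funext fun w => by rw [redundancy_cond_eq language w])
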